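-- pv_equiv track=rewrite | github.com/Josegidd/Reservation | main.py | get_priority_from_reason
-- ===== SOURCE A (Python) =====
-- def get_priority_from_reason(reason):
--     reason = reason.lower()
--
--
--     if any(word in reason for word in [
--         "accessibility", "disability", "medical", "accommodation"
--     ]):
--         return 1
--
--     elif any(word in reason for word in [
--         "group", "project", "team", "assignment"
--     ]):
--         return 2
--
--     # Priority 3 → General Study (default)
--     else:
--         return 3
-- ===== SOURCE B (Python) =====
-- # Naive multi-pattern scan: walk the text once; at each position try only the
-- # keywords bucketed under the current character, keeping the minimum priority.
-- _BY_FIRST = {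
--     "a": [("accessibility", 1), ("accommodation", 1), ("assignment", 2)],
--     "d": [("disability", 1)],
--     "g": [("group", 2)],
--     "m": [("medical", 1)],
--     "p": [("project", 2)],
--     "t": [("team", 2)],
-- }
--
-- def get_priority_from_reason(reason):
--     r = reason.lower()
--     best = 3
--     for i, c in enumerate(r):
--         for w, p in _BY_FIRST.get(c, []):
--             if r.startswith(w, i):
--                 best = min(best, p)
--     return best
-- ===== Notes on version B (the rewrite author's own statement) =====
-- stated objective: alternative
-- what changed: Replaces per-keyword substring membership tests (tiered any(word in reason)) by a naive multi-pattern text scan: one pass over the positions of the lowered string, trying at each position only the keywords bucketed under that position's first character and accumulating the minimum priority.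
import Mathlib
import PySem

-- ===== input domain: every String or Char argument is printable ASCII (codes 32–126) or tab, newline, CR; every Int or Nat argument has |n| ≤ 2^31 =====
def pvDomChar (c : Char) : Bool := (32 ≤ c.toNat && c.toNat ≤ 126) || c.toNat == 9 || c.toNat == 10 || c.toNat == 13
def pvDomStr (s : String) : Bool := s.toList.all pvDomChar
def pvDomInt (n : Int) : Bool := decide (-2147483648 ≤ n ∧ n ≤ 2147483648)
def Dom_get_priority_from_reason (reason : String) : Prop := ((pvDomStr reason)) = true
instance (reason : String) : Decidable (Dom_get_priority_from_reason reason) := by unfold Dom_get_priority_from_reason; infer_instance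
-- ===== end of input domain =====

-- B replaces A's tiered per-keyword substring tests by a single left-to-right scan of the
-- text that tries, at each position, only the keywords bucketed under that position's
-- character, keeping a running minimum priority (objective: alternative decomposition).

-- ===== PORT A =====
def get_priority_from_reason (reason : String) : Int :=
  let r := PySem.Str.lower reason
  if ["accessibility", "disability", "medical", "accommodation"].any
       (fun w => PySem.Str.isIn w r) then 1
  else if ["group", "project", "team", "assignment"].any
       (fun w => PySem.Str.isIn w r) then 2
  else 3

-- ===== PORT B =====
def pvByFirst : PySem.Dict Char (List (String × Int)) :=
  PySem.Dict.ofList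
  [('a', [("accessibility", 1), ("accommodation", 1), ("assignment", 2)]),
   ('d', [("disability", 1)]),
   ('g', [("group", 2)]),
   ('m', [("medical", 1)]),
   ('p', [("project", 2)]),
   ('t', [("team", 2)])]

def get_priority_from_reason_alt (reason : String) : Int :=
  let r := (PySem.Str.lower reason).toList
  (PySem.List.enumerate r).foldl
    (fun best ic =>
      (PySem.Dict.getD pvByFirst ic.2 []).foldl
        (fun b wp =>
          -- r.startswith(w, i) ported by hand as a prefix test at position i
          -- (exact: enumerate yields 0 ≤ i < len r, where Python's start bound does not clamp)
          if PySem.Chars.startswith (r.drop ic.1.toNat) wp.1.toList then min b wp.2 else b)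
        best)
    3

-- ===== PRECONDITION & SPEC =====
def Spec_get_priority_from_reason (reason : String) (out : Int) : Prop := out = get_priority_from_reason_alt reason
instance (reason : String) (out : Int) : Decidable (Spec_get_priority_from_reason reason out) := by unfold Spec_get_priority_from_reason; infer_instance

-- ===== CLAIM (what is proved, stated in full; the proofs are below) =====
def Claim_equal_get_priority_from_reason : Prop := ∀ (reason : String), Dom_get_priority_from_reason reason → Spec_get_priority_from_reason reason (get_priority_from_reason reason)

-- ===== LEMMAS AND PROOFS =====

-- all keyword/priority pairs appearing in pvByFirst
def pvAllPairs : List (String × Int) :=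
  [("accessibility", 1), ("accommodation", 1), ("assignment", 2),
   ("disability", 1), ("group", 2), ("medical", 1), ("project", 2), ("team", 2)]

-- every bucket entry is one of the eight table pairs
lemma pv_bucket_sub (c : Char) (wp : String × Int)
    (h : wp ∈ PySem.Dict.getD pvByFirst c []) : wp ∈ pvAllPairs := by
  have hm : pvByFirst = PySem.Dict.mk
    [('a', [("accessibility", 1), ("accommodation", 1), ("assignment", 2)]),
     ('d', [("disability", 1)]),
     ('g', [("group", 2)]),
     ('m', [("medical", 1)]),
     ('p', [("project", 2)]),
     ('t', [("team", 2)])] := by decide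
  rw [hm, PySem.Dict.getD] at h
  simp only [PySem.Dict.get?_mk_cons] at h
  split_ifs at h <;> (simp_all [pvAllPairs, PySem.Dict.get?]; try tauto)

-- the first-letter index is complete: each pair sits in the bucket of its first letter
lemma pv_bucket_first :
    ∀ wp ∈ pvAllPairs, wp ∈ PySem.Dict.getD pvByFirst (wp.1.toList.headD ' ') [] := by
  decide

lemma pv_foldl_le_init {α : Type} (f : Int → α → Int) (hf : ∀ b x, f b x ≤ b) :
    ∀ (l : List α) (b : Int), l.foldl f b ≤ b := by
  intro l
  induction l with
  | nil => intro b; simp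
  | cons x xs ih => intro b; exact le_trans (ih (f b x)) (hf b x)

lemma pv_foldl_ge {α : Type} (f : Int → α → Int) (k : Int) :
    ∀ (l : List α), (∀ b, ∀ x ∈ l, k ≤ b → k ≤ f b x) →
      ∀ (b : Int), k ≤ b → k ≤ l.foldl f b := by
  intro l
  induction l with
  | nil => intro _ b hb; simpa using hb
  | cons x xs ih =>
    intro hf b hb
    exact ih (fun b x hx => hf b x (List.mem_cons_of_mem _ hx))
      (f b x) (hf b x List.mem_cons_self hb)

lemma pv_foldl_le_mem {α : Type} (f : Int → α → Int) (hf : ∀ b x, f b x ≤ b)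
    (x : α) (v : Int) (hx : ∀ b, f b x ≤ v) :
    ∀ (l : List α) (b : Int), x ∈ l → l.foldl f b ≤ v := by
  intro l
  induction l with
  | nil => intro b h; simp at h
  | cons y ys ih =>
    intro b h
    rcases List.mem_cons.mp h with rfl | h
    · exact le_trans (pv_foldl_le_init f hf ys (f b x)) (hx b)
    · exact ih (f b y) h

-- the inner fold's step of B's port, named for the lemmas
def pvInner (r : List Char) (i : Int) (best : Int) (wp : String × Int) : Int :=
  if PySem.Chars.startswith (r.drop i.toNat) wp.1.toList then min best wp.2 else best

lemma pvInner_le (r : List Char) (i : Int) : ∀ b wp, pvInner r i b wp ≤ b := by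
  intro b wp
  unfold pvInner
  split <;> simp

-- B's whole fold, from an arbitrary accumulator
def pvScan (r : List Char) (l : List (Int × Char)) (b : Int) : Int :=
  l.foldl (fun best ic => (PySem.Dict.getD pvByFirst ic.2 []).foldl (pvInner r ic.1) best) b

lemma pvScan_le_init (r : List Char) (l : List (Int × Char)) (b : Int) :
    pvScan r l b ≤ b := by
  unfold pvScan
  exact pv_foldl_le_init _ (fun b ic => pv_foldl_le_init _ (pvInner_le r ic.1) _ b) l b

-- a keyword matching somewhere in r is a substring of r
lemma pv_match_isIn (r : List Char) (i : Int) (w : List Char)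
    (h : PySem.Chars.startswith (r.drop i.toNat) w = true) :
    PySem.Chars.isIn w r = true :=
  (PySem.Chars.exists_prefix_drop_iff_isIn w r).mp
    ⟨i.toNat, (PySem.Chars.startswith_iff _ _).mp h⟩

-- lower bound: if every table keyword occurring in r has priority ≥ k (k ≤ 3), the scan stays ≥ k
lemma pvScan_ge (r : List Char) (l : List (Int × Char)) (k : Int) (hk3 : k ≤ 3)
    (hocc : ∀ wp ∈ pvAllPairs, PySem.Chars.isIn wp.1.toList r = true → k ≤ wp.2) :
    k ≤ pvScan r l 3 := by
  unfold pvScan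
  refine pv_foldl_ge _ k l ?_ 3 hk3
  intro b ic _ hb
  refine pv_foldl_ge _ k _ ?_ b hb
  intro b' wp hwp hb'
  unfold pvInner
  split
  · rename_i hs
    exact le_min hb' (hocc wp (pv_bucket_sub ic.2 wp hwp) (pv_match_isIn r ic.1 wp.1.toList hs))
  · exact hb'

-- upper bound: if table keyword wp occurs in r, the scan over enumerate r is ≤ wp.2
lemma pvScan_le_of_isIn (r : List Char) (wp : String × Int) (hwp : wp ∈ pvAllPairs)
    (hne : wp.1.toList ≠ []) (hocc : PySem.Chars.isIn wp.1.toList r = true) (b : Int) :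
    pvScan r (PySem.List.enumerate r) b ≤ wp.2 := by
  obtain ⟨j, hpre⟩ := (PySem.Chars.exists_prefix_drop_iff_isIn wp.1.toList r).mpr hocc
  have hj : j < r.length := by
    by_contra hge
    have hnil : r.drop j = [] := List.drop_eq_nil_of_le (by omega)
    rw [hnil] at hpre
    exact hne (List.prefix_nil.mp hpre)
  have hmem : ((j : Int), r[j]) ∈ PySem.List.enumerate r := by
    rw [PySem.List.mem_enumerate_iff]
    exact ⟨j, hj, by simp⟩
  -- the matched position carries the keyword's first letter
  have hhead : wp.1.toList.headD ' ' = r[j] := by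
    cases hw : wp.1.toList with
    | nil => exact absurd hw hne
    | cons c cs =>
      obtain ⟨t, ht⟩ := hpre
      rw [hw] at ht
      have hdrop : r.drop j = c :: (cs ++ t) := by rw [← ht]; simp
      have h0 : (r.drop j)[0]? = r[j]? := by
        rw [List.getElem?_drop]; norm_num
      rw [hdrop] at h0
      simp only [List.getElem?_cons_zero] at h0
      rw [List.getElem?_eq_getElem hj] at h0
      simp only [List.headD_cons]
      exact (Option.some_inj.mp h0)
  have hbucket : wp ∈ PySem.Dict.getD pvByFirst r[j] [] := by
    rw [← hhead]; exact pv_bucket_first wp hwp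
  unfold pvScan
  refine pv_foldl_le_mem _ (fun b ic => pv_foldl_le_init _ (pvInner_le r ic.1) _ b)
    ((j : Int), r[j]) wp.2 ?_ (PySem.List.enumerate r) b hmem
  intro b'
  refine pv_foldl_le_mem (pvInner r (j : Int)) (pvInner_le r (j : Int)) wp wp.2 ?_ _ b' hbucket
  intro b''
  unfold pvInner
  have hs : PySem.Chars.startswith (r.drop ((j : Int)).toNat) wp.1.toList = true := by
    rw [PySem.Chars.startswith_iff]; simpa using hpre
  rw [hs]
  simp

-- the scan computes exactly A's tiered answer
lemma pvB_eq_tiers (r : List Char) :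
    pvScan r (PySem.List.enumerate r) 3 =
      if ["accessibility", "disability", "medical", "accommodation"].any
           (fun w => PySem.Chars.isIn w.toList r) then 1
      else if ["group", "project", "team", "assignment"].any
           (fun w => PySem.Chars.isIn w.toList r) then 2
      else 3 := by
  by_cases h1 : ["accessibility", "disability", "medical", "accommodation"].any
      (fun w => PySem.Chars.isIn w.toList r) = true
  · rw [if_pos h1]
    simp only [List.any_eq_true] at h1
    obtain ⟨w, hw, hocc⟩ := h1
    have hwp : ∃ wp ∈ pvAllPairs, wp.1 = w ∧ wp.2 = 1 ∧ wp.1.toList ≠ [] := by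
      fin_cases hw <;> decide
    obtain ⟨wp, hmem, hw1, hp1, hne⟩ := hwp
    have hle : pvScan r (PySem.List.enumerate r) 3 ≤ 1 := by
      rw [← hp1]
      exact pvScan_le_of_isIn r wp hmem hne (by rw [hw1]; exact hocc) 3
    have hge : 1 ≤ pvScan r (PySem.List.enumerate r) 3 := by
      refine pvScan_ge r _ 1 (by norm_num) ?_
      intro wp hwp _
      fin_cases hwp <;> norm_num
    omega
  · rw [if_neg h1]
    by_cases h2 : ["group", "project", "team", "assignment"].any
        (fun w => PySem.Chars.isIn w.toList r) = true
    · rw [if_pos h2]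
      simp only [List.any_eq_true] at h2
      obtain ⟨w, hw, hocc⟩ := h2
      have hwp : ∃ wp ∈ pvAllPairs, wp.1 = w ∧ wp.2 = 2 ∧ wp.1.toList ≠ [] := by
        fin_cases hw <;> decide
      obtain ⟨wp, hmem, hw1, hp1, hne⟩ := hwp
      have hle : pvScan r (PySem.List.enumerate r) 3 ≤ 2 := by
        rw [← hp1]
        exact pvScan_le_of_isIn r wp hmem hne (by rw [hw1]; exact hocc) 3
      have hge : 2 ≤ pvScan r (PySem.List.enumerate r) 3 := by
        refine pvScan_ge r _ 2 (by norm_num) ?_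
        intro wp hwp hocc'
        simp only [List.any_eq_true, not_exists] at h1
        push Not at h1
        fin_cases hwp <;> simp_all
      omega
    · rw [if_neg h2]
      have hge : 3 ≤ pvScan r (PySem.List.enumerate r) 3 := by
        refine pvScan_ge r _ 3 le_rfl ?_
        intro wp hwp hocc'
        simp only [List.any_eq_true, not_exists] at h1 h2
        push Not at h1 h2
        exfalso
        fin_cases hwp <;> simp_all
      have hle := pvScan_le_init r (PySem.List.enumerate r) 3
      omega

-- ===== VERDICT (by name: the statement is the Claim_ definition above) =====
theorem get_priority_from_reason_spec : Claim_equal_get_priority_from_reason := by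
  intro reason _
  unfold Spec_get_priority_from_reason get_priority_from_reason get_priority_from_reason_alt
  have hB : (PySem.List.enumerate ((PySem.Str.lower reason).toList)).foldl
      (fun best ic =>
        (PySem.Dict.getD pvByFirst ic.2 []).foldl
          (fun b wp =>
            if PySem.Chars.startswith (((PySem.Str.lower reason).toList).drop ic.1.toNat) wp.1.toList
            then min b wp.2 else b) best) 3
      = pvScan ((PySem.Str.lower reason).toList) (PySem.List.enumerate ((PySem.Str.lower reason).toList)) 3 := rfl
  simp only [hB, pvB_eq_tiers]
  simp [PySem.Str.isIn]
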